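-- pv_equiv track=rewrite | github.com/awforsythe/media-tools | forsythe/cropper/rect.py | get_extremes
-- ===== SOURCE A (Python) =====
-- def get_extremes(lines, coord):
--     min_line_coord = None
--     min_line = None
--     max_line_coord = None
--     max_line = None
--     for line in lines:
--         for point in line:
--             if min_line_coord is None or point[coord] < min_line_coord:
--                 min_line_coord = point[coord]
--                 min_line = line
--             if max_line_coord is None or point[coord] > max_line_coord:
--                 max_line_coord = point[coord]
--                 max_line = line
--     return min_line, max_line
-- ===== SOURCE B (Python) =====
-- def get_extremes(lines, coord):
--     values = [point[coord] for line in lines for point in line]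
--     if not values:
--         return None, None
--     lo, hi = min(values), max(values)
--     min_line = next(line for line in lines if any(p[coord] == lo for p in line))
--     max_line = next(line for line in lines if any(p[coord] == hi for p in line))
--     return min_line, max_line
-- ===== Notes on version B (the rewrite author's own statement) =====
-- stated objective: alternative
-- what changed: Replaces A's single pass maintaining four argmin/argmax tracking variables by staged passes: first compute the global min and max coordinate values, then locate each extreme line by searching for the first line containing a point with that value.
import Mathlib
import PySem

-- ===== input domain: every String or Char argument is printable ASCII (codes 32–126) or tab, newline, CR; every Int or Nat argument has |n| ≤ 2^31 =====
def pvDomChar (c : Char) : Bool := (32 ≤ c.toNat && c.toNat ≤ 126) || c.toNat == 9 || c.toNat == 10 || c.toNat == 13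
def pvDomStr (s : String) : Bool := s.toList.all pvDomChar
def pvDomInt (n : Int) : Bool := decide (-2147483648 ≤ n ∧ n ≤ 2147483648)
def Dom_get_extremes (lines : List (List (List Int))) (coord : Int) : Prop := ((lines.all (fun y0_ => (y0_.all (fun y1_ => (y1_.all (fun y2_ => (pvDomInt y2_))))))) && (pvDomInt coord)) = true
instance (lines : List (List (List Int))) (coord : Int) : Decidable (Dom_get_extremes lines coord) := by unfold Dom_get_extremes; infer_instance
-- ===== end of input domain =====

-- B first computes the global min and max coordinate VALUES, then in a second stage finds the
-- first line containing a point with each value, instead of A's single four-variable tracking pass (alternative).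


-- ===== PORT A =====
-- the body of A's inner loop: updates (min_line_coord, min_line, max_line_coord, max_line)
def pvStep (coord : Int) (line : List (List Int))
    (st : Option Int × Option (List (List Int)) × Option Int × Option (List (List Int)))
    (point : List Int) :
    Option Int × Option (List (List Int)) × Option Int × Option (List (List Int)) :=
  let v := (PySem.List.pyGet? point coord).getD 0   -- point[coord]; Pre_ keeps the index in range
  let mn := match st.1 with
    | none => (some v, some line)
    | some m => if v < m then (some v, some line) else (st.1, st.2.1)
  let mx := match st.2.2.1 with
    | none => (some v, some line)
    | some m => if m < v then (some v, some line) else (st.2.2.1, st.2.2.2)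
  (mn.1, mn.2, mx.1, mx.2)

def get_extremes (lines : List (List (List Int))) (coord : Int) : Option (List (List Int)) × Option (List (List Int)) :=
  let st := lines.foldl (fun st line => line.foldl (pvStep coord line) st)
    ((none, none, none, none) : Option Int × Option (List (List Int)) × Option Int × Option (List (List Int)))
  (st.2.1, st.2.2.2)

-- ===== PORT B =====
def get_extremes_alt (lines : List (List (List Int))) (coord : Int) : Option (List (List Int)) × Option (List (List Int)) :=
  let values := lines.flatMap (fun line => line.map (fun p => (PySem.List.pyGet? p coord).getD 0))
  match PySem.List.min? values (fun v => v), PySem.List.max? values (fun v => v) with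
  | some lo, some hi =>
      (lines.find? (fun line => line.any (fun p => (PySem.List.pyGet? p coord).getD 0 == lo)),
       lines.find? (fun line => line.any (fun p => (PySem.List.pyGet? p coord).getD 0 == hi)))
  | _, _ => (none, none)

-- ===== PRECONDITION & SPEC =====
-- Pre_ excludes exactly the inputs where Python A raises IndexError: some point has no entry at index coord.
def Pre_get_extremes (lines : List (List (List Int))) (coord : Int) : Prop :=
  ∀ line ∈ lines, ∀ point ∈ line, PySem.Raise.InRange point.length coord
instance (lines : List (List (List Int))) (coord : Int) : Decidable (Pre_get_extremes lines coord) := by unfold Pre_get_extremes; infer_instance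
def pvWitness_get_extremes : List (List (List Int)) × Int := ([[[1, 2], [3, 4]], [[5, 0]]], 0)

def Spec_get_extremes (lines : List (List (List Int))) (coord : Int) (out : Option (List (List Int)) × Option (List (List Int))) : Prop := out = get_extremes_alt lines coord
instance (lines : List (List (List Int))) (coord : Int) (out : Option (List (List Int)) × Option (List (List Int))) : Decidable (Spec_get_extremes lines coord out) := by unfold Spec_get_extremes; infer_instance

-- ===== CLAIM (what is proved, stated in full; the proofs are below) =====
def Claim_equal_get_extremes : Prop := ∀ (lines : List (List (List Int))) (coord : Int), Dom_get_extremes lines coord → Pre_get_extremes lines coord → Spec_get_extremes lines coord (get_extremes lines coord)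

-- ===== LEMMAS AND PROOFS =====

-- point[coord] as both ports compute it
def pvVal (coord : Int) (p : List Int) : Int := (PySem.List.pyGet? p coord).getD 0

-- the flattened (value, line) pairs, in A's visiting order
def pvPairs (coord : Int) (lines : List (List (List Int))) : List (Int × List (List Int)) :=
  lines.flatMap (fun line => line.map (fun point => (pvVal coord point, line)))

def pvSplit (o : Option (Int × List (List Int))) : Option Int × Option (List (List Int)) :=
  match o with
  | none => (none, none)
  | some (v, l) => (some v, some l)

def pvState (a b : Option (Int × List (List Int))) :
    Option Int × Option (List (List Int)) × Option Int × Option (List (List Int)) :=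
  ((pvSplit a).1, (pvSplit a).2, (pvSplit b).1, (pvSplit b).2)

def pvMinStep (acc : Option (Int × List (List Int))) (x : Int × List (List Int)) : Option (Int × List (List Int)) :=
  match acc with
  | none => some x
  | some m => if x.1 < m.1 then some x else some m

def pvMaxStep (acc : Option (Int × List (List Int))) (x : Int × List (List Int)) : Option (Int × List (List Int)) :=
  match acc with
  | none => some x
  | some m => if m.1 < x.1 then some x else some m

theorem pv_step (coord : Int) (line : List (List Int)) (a b : Option (Int × List (List Int))) (p : List Int) :
    pvStep coord line (pvState a b) p
      = pvState (pvMinStep a (pvVal coord p, line)) (pvMaxStep b (pvVal coord p, line)) := by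
  rcases a with _ | ⟨mv, mL⟩ <;> rcases b with _ | ⟨xv, xL⟩ <;>
    simp only [pvStep, pvState, pvSplit, pvMinStep, pvMaxStep, pvVal] <;> split_ifs <;> rfl

theorem pv_inner (coord : Int) (line : List (List Int)) :
    ∀ (pts : List (List Int)) (a b : Option (Int × List (List Int))),
      pts.foldl (pvStep coord line) (pvState a b)
      = pvState
          ((pts.map (fun point => (pvVal coord point, line))).foldl pvMinStep a)
          ((pts.map (fun point => (pvVal coord point, line))).foldl pvMaxStep b) := by
  intro pts
  induction pts with
  | nil => intro a b; rfl
  | cons p t ih =>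
    intro a b
    simp only [List.foldl_cons, List.map_cons, pv_step]
    exact ih _ _

theorem pv_outer (coord : Int) :
    ∀ (lines : List (List (List Int))) (a b : Option (Int × List (List Int))),
      lines.foldl (fun st line => line.foldl (pvStep coord line) st) (pvState a b)
      = pvState ((pvPairs coord lines).foldl pvMinStep a) ((pvPairs coord lines).foldl pvMaxStep b) := by
  intro lines
  induction lines with
  | nil => intro a b; rfl
  | cons l t ih =>
    intro a b
    simp only [List.foldl_cons, pvPairs, List.flatMap_cons, List.foldl_append]
    rw [show (l.map fun point => (pvVal coord point, l)) = (l.map fun point => (pvVal coord point, l)) from rfl]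
    rw [pv_inner coord l l a b]
    exact ih _ _

-- if the accumulator is already minimal, the fold keeps it (ties kept: the update is strict)
theorem pv_min_keep (pairs : List (Int × List (List Int))) :
    ∀ (a : Int × List (List Int)), (∀ t ∈ pairs, a.1 ≤ t.1) → pairs.foldl pvMinStep (some a) = some a := by
  induction pairs with
  | nil => intro a _; rfl
  | cons t rest ih =>
    intro a h
    have ht : a.1 ≤ t.1 := h t (List.mem_cons_self ..)
    simp only [List.foldl_cons, pvMinStep, if_neg (not_lt.mpr ht)]
    exact ih a (fun u hu => h u (List.mem_cons_of_mem _ hu))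

theorem pv_max_keep (pairs : List (Int × List (List Int))) :
    ∀ (a : Int × List (List Int)), (∀ t ∈ pairs, t.1 ≤ a.1) → pairs.foldl pvMaxStep (some a) = some a := by
  induction pairs with
  | nil => intro a _; rfl
  | cons t rest ih =>
    intro a h
    have ht : t.1 ≤ a.1 := h t (List.mem_cons_self ..)
    simp only [List.foldl_cons, pvMaxStep, if_neg (not_lt.mpr ht)]
    exact ih a (fun u hu => h u (List.mem_cons_of_mem _ hu))

-- with m a lower bound of the list, strictly below the accumulator, and attained,
-- the fold lands on the FIRST pair whose value is m
theorem pv_min_find (m : Int) (pairs : List (Int × List (List Int))) :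
    ∀ (a : Int × List (List Int)), (∀ t ∈ pairs, m ≤ t.1) → m < a.1 → (∃ t ∈ pairs, t.1 = m) →
      pairs.foldl pvMinStep (some a) = pairs.find? (fun t => t.1 == m) := by
  induction pairs with
  | nil => rintro a _ _ ⟨t, ht, _⟩; exact absurd ht (List.not_mem_nil)
  | cons t rest ih =>
    intro a h hlt hmem
    by_cases htm : t.1 = m
    · have hstep : t.1 < a.1 := htm ▸ hlt
      have hkeep : rest.foldl pvMinStep (some t) = some t :=
        pv_min_keep rest t (fun u hu => htm ▸ h u (List.mem_cons_of_mem _ hu))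
      rw [List.find?_cons_of_pos (h := by simp [htm]), List.foldl_cons,
        show pvMinStep (some a) t = some t from by simp [pvMinStep, hstep], hkeep]
    · have hmt : m < t.1 := lt_of_le_of_ne (h t (List.mem_cons_self ..)) (Ne.symm htm)
      have hmem' : ∃ u ∈ rest, u.1 = m := by
        rcases hmem with ⟨u, hu, hum⟩
        rcases List.mem_cons.mp hu with rfl | hu'
        · exact absurd hum htm
        · exact ⟨u, hu', hum⟩
      have h' : ∀ u ∈ rest, m ≤ u.1 := fun u hu => h u (List.mem_cons_of_mem _ hu)
      rw [List.find?_cons_of_neg (h := by simp [htm]), List.foldl_cons]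
      by_cases hc : t.1 < a.1
      · rw [show pvMinStep (some a) t = some t from by simp [pvMinStep, hc]]
        exact ih t h' hmt hmem'
      · rw [show pvMinStep (some a) t = some a from by simp [pvMinStep, hc]]
        exact ih a h' hlt hmem'

theorem pv_max_find (m : Int) (pairs : List (Int × List (List Int))) :
    ∀ (a : Int × List (List Int)), (∀ t ∈ pairs, t.1 ≤ m) → a.1 < m → (∃ t ∈ pairs, t.1 = m) →
      pairs.foldl pvMaxStep (some a) = pairs.find? (fun t => t.1 == m) := by
  induction pairs with
  | nil => rintro a _ _ ⟨t, ht, _⟩; exact absurd ht (List.not_mem_nil)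
  | cons t rest ih =>
    intro a h hlt hmem
    by_cases htm : t.1 = m
    · have hstep : a.1 < t.1 := htm ▸ hlt
      have hkeep : rest.foldl pvMaxStep (some t) = some t :=
        pv_max_keep rest t (fun u hu => htm ▸ h u (List.mem_cons_of_mem _ hu))
      rw [List.find?_cons_of_pos (h := by simp [htm]), List.foldl_cons,
        show pvMaxStep (some a) t = some t from by simp [pvMaxStep, hstep], hkeep]
    · have hmt : t.1 < m := lt_of_le_of_ne (h t (List.mem_cons_self ..)) htm
      have hmem' : ∃ u ∈ rest, u.1 = m := by
        rcases hmem with ⟨u, hu, hum⟩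
        rcases List.mem_cons.mp hu with rfl | hu'
        · exact absurd hum htm
        · exact ⟨u, hu', hum⟩
      have h' : ∀ u ∈ rest, u.1 ≤ m := fun u hu => h u (List.mem_cons_of_mem _ hu)
      rw [List.find?_cons_of_neg (h := by simp [htm]), List.foldl_cons]
      by_cases hc : a.1 < t.1
      · rw [show pvMaxStep (some a) t = some t from by simp [pvMaxStep, hc]]
        exact ih t h' hmt hmem'
      · rw [show pvMaxStep (some a) t = some a from by simp [pvMaxStep, hc]]
        exact ih a h' hlt hmem'

-- from-none wrappers: the fold over all pairs finds the first pair with the extremal value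
theorem pv_min_main (m : Int) (pairs : List (Int × List (List Int)))
    (h : ∀ t ∈ pairs, m ≤ t.1) (hmem : ∃ t ∈ pairs, t.1 = m) :
    pairs.foldl pvMinStep none = pairs.find? (fun t => t.1 == m) := by
  cases pairs with
  | nil => rfl
  | cons t rest =>
    have hstep : List.foldl pvMinStep none (t :: rest) = rest.foldl pvMinStep (some t) := rfl
    rw [hstep]
    by_cases htm : t.1 = m
    · have : rest.foldl pvMinStep (some t) = some t :=
        pv_min_keep rest t (fun u hu => htm ▸ h u (List.mem_cons_of_mem _ hu))
      rw [this, List.find?_cons_of_pos (h := by simp [htm])]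
    · have hmt : m < t.1 := lt_of_le_of_ne (h t (List.mem_cons_self ..)) (Ne.symm htm)
      have hmem' : ∃ u ∈ rest, u.1 = m := by
        rcases hmem with ⟨u, hu, hum⟩
        rcases List.mem_cons.mp hu with rfl | hu'
        · exact absurd hum htm
        · exact ⟨u, hu', hum⟩
      rw [pv_min_find m rest t (fun u hu => h u (List.mem_cons_of_mem _ hu)) hmt hmem',
        List.find?_cons_of_neg (h := by simp [htm])]

theorem pv_max_main (m : Int) (pairs : List (Int × List (List Int)))
    (h : ∀ t ∈ pairs, t.1 ≤ m) (hmem : ∃ t ∈ pairs, t.1 = m) :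
    pairs.foldl pvMaxStep none = pairs.find? (fun t => t.1 == m) := by
  cases pairs with
  | nil => rfl
  | cons t rest =>
    have hstep : List.foldl pvMaxStep none (t :: rest) = rest.foldl pvMaxStep (some t) := rfl
    rw [hstep]
    by_cases htm : t.1 = m
    · have : rest.foldl pvMaxStep (some t) = some t :=
        pv_max_keep rest t (fun u hu => htm ▸ h u (List.mem_cons_of_mem _ hu))
      rw [this, List.find?_cons_of_pos (h := by simp [htm])]
    · have hmt : t.1 < m := lt_of_le_of_ne (h t (List.mem_cons_self ..)) htm
      have hmem' : ∃ u ∈ rest, u.1 = m := by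
        rcases hmem with ⟨u, hu, hum⟩
        rcases List.mem_cons.mp hu with rfl | hu'
        · exact absurd hum htm
        · exact ⟨u, hu', hum⟩
      rw [pv_max_find m rest t (fun u hu => h u (List.mem_cons_of_mem _ hu)) hmt hmem',
        List.find?_cons_of_neg (h := by simp [htm])]

-- the first PAIR with value m carries exactly the first LINE containing a point of value m
theorem pv_find_pairs_lines (coord m : Int) :
    ∀ (lines : List (List (List Int))),
      ((pvPairs coord lines).find? (fun t => t.1 == m)).map Prod.snd
        = lines.find? (fun line => line.any (fun p => pvVal coord p == m)) := by
  intro lines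
  induction lines with
  | nil => rfl
  | cons l rest ih =>
    simp only [pvPairs, List.flatMap_cons, List.find?_append, List.find?_map, List.find?_cons]
    cases hf : l.find? (fun p => pvVal coord p == m) with
    | none =>
      have hany : l.any (fun p => pvVal coord p == m) = false := by
        rw [List.any_eq_false]
        intro p hp
        have := List.find?_eq_none.mp hf p hp
        simpa using this
      simp only [Function.comp_def, hf, Option.map_none, Option.none_or, hany]
      simpa [pvPairs] using ih
    | some p =>
      have hany : l.any (fun p => pvVal coord p == m) = true :=
        List.any_eq_true.mpr ⟨p, List.mem_of_find?_eq_some hf, by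
          have := List.find?_some hf; simpa using this⟩
      simp [Function.comp_def, hf, hany]

theorem pv_split_snd (o : Option (Int × List (List Int))) : (pvSplit o).2 = o.map Prod.snd := by
  rcases o with _ | ⟨v, l⟩ <;> rfl

-- the list of values B flattens is exactly the first components of the pairs
theorem pv_values_eq (coord : Int) (lines : List (List (List Int))) :
    lines.flatMap (fun line => line.map (fun p => (PySem.List.pyGet? p coord).getD 0))
      = (pvPairs coord lines).map Prod.fst := by
  simp [pvPairs, List.map_flatMap, Function.comp_def, pvVal]

-- ===== VERDICT (by name: the statement is the Claim_ definition above) =====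
theorem get_extremes_spec : Claim_equal_get_extremes := by
  intro lines coord _ _
  unfold Spec_get_extremes get_extremes get_extremes_alt
  have h := pv_outer coord lines none none
  have hinit : pvState none none
      = ((none, none, none, none) : Option Int × Option (List (List Int)) × Option Int × Option (List (List Int))) := rfl
  rw [hinit] at h
  rw [h]
  rw [pv_values_eq coord lines]
  cases hpp : pvPairs coord lines with
  | nil => rfl
  | cons x xs =>
    have hne : (x :: xs).map (Prod.fst (β := List (List Int))) ≠ [] := by simp
    cases hlo : PySem.List.min? ((x :: xs).map Prod.fst) (fun v => v) with
    | none => exact absurd ((PySem.List.min?_eq_none_iff _ _).mp hlo) hne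
    | some lo =>
      cases hhi : PySem.List.max? ((x :: xs).map Prod.fst) (fun v => v) with
      | none => exact absurd ((PySem.List.max?_eq_none_iff _ _).mp hhi) hne
      | some hi =>
        have hlo_mem : lo ∈ (x :: xs).map Prod.fst := PySem.List.min?_mem hlo
        have hhi_mem : hi ∈ (x :: xs).map Prod.fst := PySem.List.max?_mem hhi
        have hlo_min : ∀ t ∈ (x :: xs), lo ≤ t.1 := by
          intro t ht
          exact PySem.List.min?_isMin hlo t.1 (List.mem_map_of_mem ht)
        have hhi_max : ∀ t ∈ (x :: xs), t.1 ≤ hi := by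
          intro t ht
          exact PySem.List.max?_isMax hhi t.1 (List.mem_map_of_mem ht)
        have hlo_att : ∃ t ∈ (x :: xs), t.1 = lo := by
          rcases List.mem_map.mp hlo_mem with ⟨t, ht, hteq⟩
          exact ⟨t, ht, hteq⟩
        have hhi_att : ∃ t ∈ (x :: xs), t.1 = hi := by
          rcases List.mem_map.mp hhi_mem with ⟨t, ht, hteq⟩
          exact ⟨t, ht, hteq⟩
        have hmin := pv_min_main lo (x :: xs) hlo_min hlo_att
        have hmax := pv_max_main hi (x :: xs) hhi_max hhi_att
        have hminL := pv_find_pairs_lines coord lo lines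
        have hmaxL := pv_find_pairs_lines coord hi lines
        rw [hpp] at hminL hmaxL
        simp only [List.map_cons] at hlo hhi
        simp only [List.map_cons, hlo, hhi, pvState, pv_split_snd, hmin, hmax]
        exact Prod.ext (by simpa [pvVal] using hminL) (by simpa [pvVal] using hmaxL)
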